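-- pv_equiv track=rewrite | github.com/byteford/LRRcomunityModPack | make-changelog.py | process_changelist
-- ===== SOURCE A (Python) =====
-- from operator import itemgetter
--
-- def process_changelist(changes):
-- 	changelog = { "added": [], "updated": [], "removed": [], "configs": [] }
--
-- 	for change in changes:
-- 		if change["action"] == "ADD":
-- 			changelog["added"].append(change)
-- 		elif change["action"] == "UPD":
-- 			changelog["updated"].append(change)
-- 		elif change["action"] == "DEL":
-- 			changelog["removed"].append(change)
-- 		elif change["action"] == "CFG":
-- 			changelog["configs"].append(change)
--
-- 	changelog["added"] = sorted(changelog["added"], key=itemgetter("name"))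
-- 	changelog["updated"] = sorted(changelog["updated"], key=itemgetter("name"))
-- 	changelog["removed"] = sorted(changelog["removed"], key=itemgetter("name"))
--
-- 	return changelog
-- ===== SOURCE B (Python) =====
-- from operator import itemgetter
--
-- def process_changelist(changes):
--     # one stable sort of all ADD/UPD/DEL entries by name, then a single
--     # distributing pass; configs keep their original order (A never sorts them)
--     rest = sorted([c for c in changes if c["action"] in ("ADD", "UPD", "DEL")],
--                   key=itemgetter("name"))
--     added, updated, removed = [], [], []
--     for c in rest:
--         if c["action"] == "ADD":
--             added.append(c)
--         elif c["action"] == "UPD":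
--             updated.append(c)
--         else:
--             removed.append(c)
--     configs = [c for c in changes if c["action"] == "CFG"]
--     return {"added": added, "updated": updated, "removed": removed, "configs": configs}
-- ===== Notes on version B (the rewrite author's own statement) =====
-- stated objective: alternative
-- what changed: B sorts the ADD/UPD/DEL entries once with a single stable sort by name and then distributes them into the three buckets in one pass, instead of A's partition-first-then-three-separate-sorts; configs are collected by a separate filter in original order.
import Mathlib
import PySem

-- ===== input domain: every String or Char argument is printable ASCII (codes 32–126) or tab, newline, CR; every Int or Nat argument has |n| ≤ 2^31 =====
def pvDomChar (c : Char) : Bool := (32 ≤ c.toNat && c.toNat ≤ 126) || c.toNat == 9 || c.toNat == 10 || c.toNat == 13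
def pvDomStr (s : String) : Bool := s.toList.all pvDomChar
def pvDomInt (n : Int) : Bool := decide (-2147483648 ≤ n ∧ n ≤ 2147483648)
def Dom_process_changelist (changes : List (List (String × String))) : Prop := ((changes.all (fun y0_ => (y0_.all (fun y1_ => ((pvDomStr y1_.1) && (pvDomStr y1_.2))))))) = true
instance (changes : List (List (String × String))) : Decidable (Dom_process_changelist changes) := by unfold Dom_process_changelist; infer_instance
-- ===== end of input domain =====

-- B replaces A's partition-then-three-sorts by one stable sort of the non-config
-- entries followed by a single distributing pass; same return value on Pre_.

-- shared model of the Python subscript c[k] on a dict (first-match lookup;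
-- the "" default is never reached inside Pre_, where Python would raise KeyError)
def pvGet (c : List (String × String)) (k : String) : String :=
  ((c.find? (fun p => p.1 == k)).map Prod.snd).getD ""

-- ===== PORT A =====
def process_changelist (changes : List (List (String × String))) : List (String × List (List (String × String))) :=
  -- the four fixed-key dict entries are tracked as a 4-tuple (added, updated, removed, configs)
  let st := changes.foldl
    (fun (s : List (List (String × String)) × List (List (String × String)) × List (List (String × String)) × List (List (String × String))) change =>
      if pvGet change "action" == "ADD" then (s.1 ++ [change], s.2)
      else if pvGet change "action" == "UPD" then (s.1, s.2.1 ++ [change], s.2.2)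
      else if pvGet change "action" == "DEL" then (s.1, s.2.1, s.2.2.1 ++ [change], s.2.2.2)
      else if pvGet change "action" == "CFG" then (s.1, s.2.1, s.2.2.1, s.2.2.2 ++ [change])
      else s)
    ([], [], [], [])
  [("added", PySem.List.sorted st.1 (fun c => pvGet c "name")),
   ("updated", PySem.List.sorted st.2.1 (fun c => pvGet c "name")),
   ("removed", PySem.List.sorted st.2.2.1 (fun c => pvGet c "name")),
   ("configs", st.2.2.2)]

-- ===== PORT B =====
def process_changelist_alt (changes : List (List (String × String))) : List (String × List (List (String × String))) :=
  let rest := PySem.List.sorted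
    (changes.filter (fun c => pvGet c "action" == "ADD" || pvGet c "action" == "UPD" || pvGet c "action" == "DEL"))
    (fun c => pvGet c "name")
  let st := rest.foldl
    (fun (s : List (List (String × String)) × List (List (String × String)) × List (List (String × String))) c =>
      if pvGet c "action" == "ADD" then (s.1 ++ [c], s.2)
      else if pvGet c "action" == "UPD" then (s.1, s.2.1 ++ [c], s.2.2)
      else (s.1, s.2.1, s.2.2 ++ [c]))
    ([], [], [])
  let configs := changes.filter (fun c => pvGet c "action" == "CFG")
  [("added", st.1), ("updated", st.2.1), ("removed", st.2.2), ("configs", configs)]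

-- ===== PRECONDITION & SPEC =====
-- Pre_ excludes exactly the inputs on which the Python A raises KeyError:
-- a change without an "action" key, or an ADD/UPD/DEL change without a "name" key.
def Pre_process_changelist (changes : List (List (String × String))) : Prop :=
  (changes.all (fun c =>
    c.any (fun p => p.1 == "action") &&
    (!(pvGet c "action" == "ADD" || pvGet c "action" == "UPD" || pvGet c "action" == "DEL")
      || c.any (fun p => p.1 == "name")))) = true
instance (changes : List (List (String × String))) : Decidable (Pre_process_changelist changes) := by
  unfold Pre_process_changelist; infer_instance
def pvWitness_process_changelist : (List (List (String × String))) :=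
  [[("action", "ADD"), ("name", "b")], [("action", "CFG")], [("action", "ADD"), ("name", "a")]]

def Spec_process_changelist (changes : List (List (String × String))) (out : List (String × List (List (String × String)))) : Prop := out = process_changelist_alt changes
instance (changes : List (List (String × String))) (out : List (String × List (List (String × String)))) : Decidable (Spec_process_changelist changes out) := by unfold Spec_process_changelist; infer_instance

-- ===== CLAIM (what is proved, stated in full; the proofs are below) =====
def Claim_equal_process_changelist : Prop := ∀ (changes : List (List (String × String))), Dom_process_changelist changes → Pre_process_changelist changes → Spec_process_changelist changes (process_changelist changes)

-- ===== LEMMAS AND PROOFS =====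

-- inserting an element strictly below every element of l puts it at the front
lemma insertBy_front {α : Type} (key : α → String) (x : α) (l : List α)
    (h : ∀ z ∈ l, key x < key z) :
    PySem.List.insertBy (fun a b => decide (key a < key b)) x l = x :: l := by
  cases l with
  | nil => rfl
  | cons y ys =>
      simp [PySem.List.insertBy, h y (List.mem_cons_self ..)]

-- filtering commutes with one stable insertion into a key-sorted list
lemma filter_insertBy {α : Type} (key : α → String) (p : α → Bool) (x : α) (l : List α)
    (hl : l.Pairwise (fun a b => key a ≤ key b)) :
    (PySem.List.insertBy (fun a b => decide (key a < key b)) x l).filter p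
      = if p x then PySem.List.insertBy (fun a b => decide (key a < key b)) x (l.filter p)
        else l.filter p := by
  induction l with
  | nil => cases hpx : p x <;> simp [PySem.List.insertBy, hpx]
  | cons y ys ih =>
      rcases List.pairwise_cons.mp hl with ⟨hy, hys⟩
      by_cases hxy : key x < key y
      · have hfront : ∀ z ∈ (y :: ys).filter p, key x < key z := by
          intro z hz
          rcases List.mem_cons.mp (List.mem_of_mem_filter hz) with h | h
          · exact h ▸ hxy
          · exact lt_of_lt_of_le hxy (hy z h)
        have hins : PySem.List.insertBy (fun a b => decide (key a < key b)) x (y :: ys)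
            = x :: y :: ys := by simp [PySem.List.insertBy, hxy]
        rw [hins]
        cases hpx : p x
        · simp [List.filter, hpx]
        · rw [if_pos rfl, insertBy_front key x _ hfront]
          simp [List.filter, hpx]
      · have step : PySem.List.insertBy (fun a b => decide (key a < key b)) x (y :: ys)
            = y :: PySem.List.insertBy (fun a b => decide (key a < key b)) x ys := by
          simp [PySem.List.insertBy, hxy]
        rw [step]
        cases hpy : p y
        · simpa [List.filter, hpy] using ih hys
        · cases hpx : p x
          · simpa [List.filter, hpy, PySem.List.insertBy, hxy, hpx] using ih hys
          · simp only [List.filter, hpy, ih hys, hpx, if_pos]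
            simp [PySem.List.insertBy, hxy]

-- appending one element to the input of sorted performs one insertion
lemma sorted_append_singleton {α : Type} (key : α → String) (xs : List α) (x : α) :
    PySem.List.sorted (xs ++ [x]) key
      = PySem.List.insertBy (fun a b => decide (key a < key b)) x (PySem.List.sorted xs key) := by
  simp [PySem.List.sorted, List.foldl_append]

-- a stable sort keyed on name commutes with any filter
lemma filter_sorted {α : Type} (key : α → String) (p : α → Bool) (xs : List α) :
    (PySem.List.sorted xs key).filter p = PySem.List.sorted (xs.filter p) key := by
  induction xs using List.reverseRecOn with
  | nil => rfl
  | append_singleton xs x ih =>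
      rw [sorted_append_singleton, filter_insertBy key p x _ (PySem.List.sorted_pairwise xs key),
        List.filter_append]
      cases hpx : p x
      · simpa [hpx] using ih
      · rw [if_pos rfl, ih]
        simp only [List.filter_cons, List.filter_nil, hpx, if_pos]
        rw [sorted_append_singleton]

-- A's four-bucket loop computes the four filters of the input
lemma foldA (changes : List (List (String × String))) :
    changes.foldl
      (fun (s : List (List (String × String)) × List (List (String × String)) × List (List (String × String)) × List (List (String × String))) change =>
        if pvGet change "action" == "ADD" then (s.1 ++ [change], s.2)
        else if pvGet change "action" == "UPD" then (s.1, s.2.1 ++ [change], s.2.2)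
        else if pvGet change "action" == "DEL" then (s.1, s.2.1, s.2.2.1 ++ [change], s.2.2.2)
        else if pvGet change "action" == "CFG" then (s.1, s.2.1, s.2.2.1, s.2.2.2 ++ [change])
        else s)
      ([], [], [], [])
    = (changes.filter (fun c => pvGet c "action" == "ADD"),
       changes.filter (fun c => pvGet c "action" == "UPD"),
       changes.filter (fun c => pvGet c "action" == "DEL"),
       changes.filter (fun c => pvGet c "action" == "CFG")) := by
  induction changes using List.reverseRecOn with
  | nil => rfl
  | append_singleton xs x ih =>
      simp only [List.foldl_append, List.foldl_cons, List.foldl_nil, ih, List.filter_append,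
        List.filter]
      by_cases h1 : pvGet x "action" == "ADD" <;>
        by_cases h2 : pvGet x "action" == "UPD" <;>
        by_cases h3 : pvGet x "action" == "DEL" <;>
        by_cases h4 : pvGet x "action" == "CFG" <;>
        simp_all [beq_iff_eq] ;
        simp [beq_eq_false_iff_ne.mpr h1, beq_eq_false_iff_ne.mpr h2,
          beq_eq_false_iff_ne.mpr h3, beq_eq_false_iff_ne.mpr h4]

-- B's three-bucket loop over a list of ADD/UPD/DEL entries computes the three filters
lemma foldB (rest : List (List (String × String)))
    (h : ∀ c ∈ rest, (pvGet c "action" == "ADD" || pvGet c "action" == "UPD"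
        || pvGet c "action" == "DEL") = true) :
    rest.foldl
      (fun (s : List (List (String × String)) × List (List (String × String)) × List (List (String × String))) c =>
        if pvGet c "action" == "ADD" then (s.1 ++ [c], s.2)
        else if pvGet c "action" == "UPD" then (s.1, s.2.1 ++ [c], s.2.2)
        else (s.1, s.2.1, s.2.2 ++ [c]))
      ([], [], [])
    = (rest.filter (fun c => pvGet c "action" == "ADD"),
       rest.filter (fun c => pvGet c "action" == "UPD"),
       rest.filter (fun c => pvGet c "action" == "DEL")) := by
  induction rest using List.reverseRecOn with
  | nil => rfl
  | append_singleton xs x ih =>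
      have hx := h x (by simp)
      have hxs : ∀ c ∈ xs, (pvGet c "action" == "ADD" || pvGet c "action" == "UPD"
          || pvGet c "action" == "DEL") = true := fun c hc => h c (by simp [hc])
      simp only [List.foldl_append, List.foldl_cons, List.foldl_nil, ih hxs,
        List.filter_append, List.filter]
      by_cases h1 : pvGet x "action" == "ADD" <;>
        by_cases h2 : pvGet x "action" == "UPD" <;>
        by_cases h3 : pvGet x "action" == "DEL" <;>
        simp_all [beq_iff_eq]

-- each of A's three sorted buckets is the corresponding filter of B's combined sorted list
lemma bucket_eq (changes : List (List (String × String))) (a : String)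
    (ha : (a == "ADD" || a == "UPD" || a == "DEL") = true) :
    PySem.List.sorted (changes.filter (fun c => pvGet c "action" == a)) (fun c => pvGet c "name")
      = (PySem.List.sorted
          (changes.filter (fun c => pvGet c "action" == "ADD" || pvGet c "action" == "UPD"
            || pvGet c "action" == "DEL"))
          (fun c => pvGet c "name")).filter (fun c => pvGet c "action" == a) := by
  rw [filter_sorted, List.filter_filter]
  congr 1
  apply List.filter_congr
  intro c _
  by_cases h : pvGet c "action" == a
  · have := eq_of_beq h
    simp_all
  · simp [h]

-- ===== VERDICT (by name: the statement is the Claim_ definition above) =====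
theorem process_changelist_spec : Claim_equal_process_changelist := by
  intro changes _ _
  unfold Spec_process_changelist process_changelist process_changelist_alt
  have hB := foldB
    (PySem.List.sorted
      (changes.filter (fun c => pvGet c "action" == "ADD" || pvGet c "action" == "UPD"
        || pvGet c "action" == "DEL"))
      (fun c => pvGet c "name"))
    (by
      intro c hc
      have := List.of_mem_filter ((PySem.List.mem_sorted _ _ _ _).mp hc)
      simpa using this)
  simp only [foldA, hB, bucket_eq changes "ADD" (by decide), bucket_eq changes "UPD" (by decide),
    bucket_eq changes "DEL" (by decide)]
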